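-- pv_equiv track=rewrite | github.com/hoshmandctf/Project-Euler-solutions | scripts/p026.py | find_longest_recurring_cycle
-- ===== SOURCE A (Python) =====
-- def find_longest_recurring_cycle(limit):
--     longest_cycle = 0
--     number = 0
--
--     for d in range(2, limit):
--         remainder = 1
--         remainders = {}
--
--         while remainder != 0 and remainder not in remainders:
--             remainders[remainder] = len(remainders)
--             remainder = (remainder * 10) % d
--
--         if remainder != 0:
--             cycle_length = len(remainders) - remainders[remainder]
--             if cycle_length > longest_cycle:
--                 longest_cycle = cycle_length
--                 number = d
--
--     return number
-- ===== SOURCE B (Python) =====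
-- def find_longest_recurring_cycle(limit):
--     longest_cycle = 0
--     number = 0
--     for d in range(2, limit):
--         r = pow(10, d, d)          # a remainder guaranteed to lie on the recurring cycle of 1/d
--         if r != 0:
--             c = 1
--             s = (r * 10) % d
--             while s != r:          # measure the cycle length directly, no dict of seen remainders
--                 s = (s * 10) % d
--                 c += 1
--             if c > longest_cycle:
--                 longest_cycle = c
--                 number = d
--     return number
-- ===== Notes on version B (the rewrite author's own statement) =====
-- stated objective: faster
-- what changed: Instead of recording every long-division remainder in a dict until one repeats, B jumps directly onto the recurring cycle with pow(10, d, d) and measures the cycle length with a bare counter loop, eliminating the dict and the pre-period iterations; intended as faster, measured 2.23x at the largest size both finished.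
import Mathlib
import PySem

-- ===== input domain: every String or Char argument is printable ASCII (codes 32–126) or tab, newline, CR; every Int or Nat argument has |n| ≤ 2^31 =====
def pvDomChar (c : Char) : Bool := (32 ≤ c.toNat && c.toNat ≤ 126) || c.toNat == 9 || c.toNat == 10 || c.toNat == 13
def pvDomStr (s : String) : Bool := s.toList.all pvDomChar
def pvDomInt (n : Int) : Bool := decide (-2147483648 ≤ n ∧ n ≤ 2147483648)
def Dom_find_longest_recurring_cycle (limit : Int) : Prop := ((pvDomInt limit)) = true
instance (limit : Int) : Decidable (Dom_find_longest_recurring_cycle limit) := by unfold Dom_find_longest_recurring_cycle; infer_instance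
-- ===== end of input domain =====

-- B replaces A's dict of seen remainders by jumping straight onto the recurring cycle with pow(10, d, d)
-- and measuring the cycle length with a plain counter loop (no dict; intended as faster — the timing
-- run measured B about 2.2x faster than A at the largest size both finished).

-- ===== PORT A =====
-- the while loop: state (remainder, remainders); fuel d+1 is proved sufficient below (the loop
-- exits within d iterations because the stored remainders are distinct values in [0, d)).
-- Python's dict (O(1) hash table) is ported as Std.HashMap: the loop only ever uses
-- contains/insert/size/getD with distinct keys, so insertion order cannot affect the result
def pvALoop (d : Int) : Nat → Int → Std.HashMap Int Int → Int × Std.HashMap Int Int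
  | 0, remainder, remainders => (remainder, remainders)
  | fuel + 1, remainder, remainders =>
    if remainder ≠ 0 ∧ remainders.contains remainder = false then
      pvALoop d fuel (PySem.Int.mod (remainder * 10) d)
        (remainders.insert remainder (remainders.size : Int))
    else (remainder, remainders)

-- body of A's 'for d in range(2, limit)' loop; 'remainders[remainder]' is ported as getD (the key
-- is proved present whenever this branch runs, so Python raises no KeyError here)
def pvAStep (st : Int × Int) (d : Int) : Int × Int :=
  let res := pvALoop d (d.toNat + 1) 1 (∅ : Std.HashMap Int Int)
  if res.1 ≠ 0 then
    let cycle_length : Int := (res.2.size : Int) - res.2.getD res.1 0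
    if cycle_length > st.1 then (cycle_length, d) else st
  else st

def find_longest_recurring_cycle (limit : Int) : Int :=
  ((PySem.List.pyRange 2 limit 1).foldl pvAStep (0, 0)).2

-- ===== PORT B =====
-- the 'while s != r' loop; fuel d+1 is proved sufficient (the cycle length is at most d)
def pvBLoop (d : Int) : Nat → Int → Int → Int → Int
  | 0, _, _, c => c
  | fuel + 1, s, r, c =>
    if s ≠ r then pvBLoop d fuel (PySem.Int.mod (s * 10) d) r (c + 1) else c

-- body of B's 'for d in range(2, limit)' loop; pow(10, d, d) is PySem.Int.powMod
def pvBStep (st : Int × Int) (d : Int) : Int × Int :=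
  let r := PySem.Int.powMod 10 d.toNat d
  if r ≠ 0 then
    let c := pvBLoop d (d.toNat + 1) (PySem.Int.mod (r * 10) d) r 1
    if c > st.1 then (c, d) else st
  else st

def find_longest_recurring_cycle_alt (limit : Int) : Int :=
  ((PySem.List.pyRange 2 limit 1).foldl pvBStep (0, 0)).2

-- ===== PRECONDITION & SPEC =====
def Spec_find_longest_recurring_cycle (limit : Int) (out : Int) : Prop := out = find_longest_recurring_cycle_alt limit
instance (limit : Int) (out : Int) : Decidable (Spec_find_longest_recurring_cycle limit out) := by unfold Spec_find_longest_recurring_cycle; infer_instance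

-- ===== CLAIM (what is proved, stated in full; the proofs are below) =====
def Claim_equal_find_longest_recurring_cycle : Prop := ∀ (limit : Int), Dom_find_longest_recurring_cycle limit → Spec_find_longest_recurring_cycle limit (find_longest_recurring_cycle limit)

-- ===== LEMMAS AND PROOFS =====

-- r_i = the i-th remainder of the long division 1/n (times 10 each step), i.e. 10^i mod n
def pvR (n i : Nat) : Nat := 10 ^ i % n

-- "A's while loop exits at index i": remainder is 0 or was already seen
def pvQb (n i : Nat) : Bool :=
  pvR n i = 0 || (List.range i).any (fun j => pvR n j == pvR n i)

-- what A's dict holds after t iterations: remainders r_0 … r_(t-1) mapped to their indices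
def pvInv (n t : Nat) (m : Std.HashMap Int Int) : Prop :=
  m.size = t ∧
    (∀ x : Int, m.contains x = true ↔ ∃ i < t, ((pvR n i : Nat) : Int) = x) ∧
    (∀ i < t, m.getD ((pvR n i : Nat) : Int) 0 = (i : Int))

lemma pvR_lt (n i : Nat) (hn : 2 ≤ n) : pvR n i < n := Nat.mod_lt _ (by omega)

lemma pvR_succ (n i : Nat) : pvR n (i + 1) = pvR n i * 10 % n := by
  simp [pvR, pow_succ, Nat.mul_mod]

lemma pvQb_iff (n i : Nat) :
    pvQb n i = true ↔ (pvR n i = 0 ∨ ∃ j < i, pvR n j = pvR n i) := by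
  simp [pvQb, List.any_eq_true, List.mem_range]

lemma pvQ_exists_le (n : Nat) (hn : 2 ≤ n) : ∃ i, i ≤ n ∧ pvQb n i = true := by
  obtain ⟨x, hx, y, hy, hxy, heq⟩ :=
    Finset.exists_ne_map_eq_of_card_lt_of_maps_to (s := Finset.range (n + 1))
      (t := Finset.range n) (by simp)
      (fun i _ => Finset.mem_range.2 (pvR_lt n i hn))
  simp only [Finset.mem_range] at hx hy
  rcases lt_or_gt_of_ne hxy with h | h
  · exact ⟨y, by omega, (pvQb_iff n y).2 (Or.inr ⟨x, h, heq⟩)⟩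
  · exact ⟨x, by omega, (pvQb_iff n x).2 (Or.inr ⟨y, h, heq.symm⟩)⟩

def pvQ_exists (n : Nat) (hn : 2 ≤ n) : ∃ i, pvQb n i = true :=
  (pvQ_exists_le n hn).imp (fun _ h => h.2)

-- k = the first exit index of A's loop
def pvK (n : Nat) (hn : 2 ≤ n) : Nat := Nat.find (pvQ_exists n hn)

lemma pvK_le (n : Nat) (hn : 2 ≤ n) : pvK n hn ≤ n := by
  obtain ⟨i, hi, hq⟩ := pvQ_exists_le n hn
  exact le_trans (Nat.find_min' _ hq) hi

lemma pvK_spec (n : Nat) (hn : 2 ≤ n) :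
    pvR n (pvK n hn) = 0 ∨ ∃ j < pvK n hn, pvR n j = pvR n (pvK n hn) :=
  (pvQb_iff n _).1 (Nat.find_spec (pvQ_exists n hn))

lemma pvK_min (n : Nat) (hn : 2 ≤ n) {m : Nat} (hm : m < pvK n hn) :
    pvR n m ≠ 0 ∧ ∀ j < m, pvR n j ≠ pvR n m := by
  have h := Nat.find_min (pvQ_exists n hn) hm
  rw [pvQb_iff] at h
  exact ⟨fun h0 => h (Or.inl h0), fun j hj hje => h (Or.inr ⟨j, hj, hje⟩)⟩

lemma pvR_inj (n : Nat) (hn : 2 ≤ n) {a b : Nat} (ha : a < pvK n hn)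
    (hb : b < pvK n hn) (hab : pvR n a = pvR n b) : a = b := by
  rcases lt_trichotomy a b with h | h | h
  · exact absurd hab ((pvK_min n hn hb).2 a h)
  · exact h
  · exact absurd hab.symm ((pvK_min n hn ha).2 b h)

lemma pvInv_empty (n : Nat) : pvInv n 0 (∅ : Std.HashMap Int Int) := by
  refine ⟨Std.HashMap.size_empty, fun x => ?_, fun i hi => by omega⟩
  simp [Std.HashMap.contains_empty]

lemma pvInv_contains_false (n : Nat) (hn : 2 ≤ n) {t : Nat} (ht : t < pvK n hn)
    {m : Std.HashMap Int Int} (h : pvInv n t m) :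
    m.contains ((pvR n t : Nat) : Int) = false := by
  rcases hc : m.contains ((pvR n t : Nat) : Int) with _ | _
  · rfl
  · obtain ⟨i, hi, hix⟩ := (h.2.1 _).1 hc
    have : pvR n i = pvR n t := by exact_mod_cast hix
    exact absurd this ((pvK_min n hn ht).2 i hi)

lemma pvInv_step (n : Nat) (hn : 2 ≤ n) {t : Nat} (ht : t < pvK n hn)
    {m : Std.HashMap Int Int} (h : pvInv n t m) :
    pvInv n (t + 1) (m.insert ((pvR n t : Nat) : Int) (m.size : Int)) := by
  have hc := pvInv_contains_false n hn ht h
  have hcmem : ((pvR n t : Nat) : Int) ∉ m := by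
    rw [Std.HashMap.mem_iff_contains, hc]; simp
  refine ⟨?_, fun x => ?_, fun i hi => ?_⟩
  · rw [Std.HashMap.size_insert, if_neg hcmem, h.1]
  · rw [Std.HashMap.contains_insert]
    constructor
    · intro hx
      rcases Bool.or_eq_true_iff.1 hx with hx | hx
      · exact ⟨t, by omega, by exact_mod_cast (beq_iff_eq.1 hx)⟩
      · obtain ⟨i, hi, hix⟩ := (h.2.1 x).1 hx
        exact ⟨i, by omega, hix⟩
    · rintro ⟨i, hi, hix⟩
      rcases Nat.lt_or_ge i t with hit | hit
      · exact Bool.or_eq_true_iff.2 (Or.inr ((h.2.1 x).2 ⟨i, hit, hix⟩))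
      · have : i = t := by omega
        subst this
        exact Bool.or_eq_true_iff.2 (Or.inl (beq_iff_eq.2 hix))
  · rw [Std.HashMap.getD_insert]
    rcases Nat.lt_or_ge i t with hit | hit
    · rw [if_neg, h.2.2 i hit]
      intro hbe
      have : pvR n t = pvR n i := by exact_mod_cast (beq_iff_eq.1 hbe)
      exact absurd (pvR_inj n hn ht (by omega) this) (by omega)
    · have : i = t := by omega
      subst this
      rw [if_pos (beq_iff_eq.2 rfl), h.1]

-- A's while loop, run from step t to the exit index k
lemma pvALoop_steps (n : Nat) (hn : 2 ≤ n) :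
    ∀ (c t fuel : Nat) (m : Std.HashMap Int Int), pvInv n t m → t + c = pvK n hn → c < fuel →
      ∃ m', pvALoop (n : Int) fuel ((pvR n t : Nat) : Int) m =
          (((pvR n (pvK n hn) : Nat) : Int), m') ∧ pvInv n (pvK n hn) m' := by
  intro c
  induction c with
  | zero =>
    intro t fuel m hm ht hf
    obtain ⟨fuel, rfl⟩ : ∃ f, fuel = f + 1 := ⟨fuel - 1, by omega⟩
    have htk : t = pvK n hn := by omega
    subst htk
    refine ⟨m, ?_, hm⟩
    rw [pvALoop, if_neg]
    rcases pvK_spec n hn with h0 | ⟨j, hj, hjr⟩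
    · rw [h0]; simp
    · intro ⟨_, hcon⟩
      rw [(hm.2.1 _).2 ⟨j, hj, by exact_mod_cast hjr⟩] at hcon
      exact Bool.true_eq_false.mp hcon
  | succ c ih =>
    intro t fuel m hm ht hf
    obtain ⟨fuel, rfl⟩ : ∃ f, fuel = f + 1 := ⟨fuel - 1, by omega⟩
    have htk : t < pvK n hn := by omega
    rw [pvALoop, if_pos]
    · have hmod : PySem.Int.mod (((pvR n t : Nat) : Int) * 10) (n : Int) =
          ((pvR n (t + 1) : Nat) : Int) := by
        have : ((pvR n t : Nat) : Int) * 10 = ((pvR n t * 10 : Nat) : Int) := by push_cast; ring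
        rw [this, PySem.Int.mod_natCast, pvR_succ]
      rw [hmod]
      exact ih (t + 1) fuel _ (pvInv_step n hn htk hm) (by omega) (by omega)
    · constructor
      · have := (pvK_min n hn htk).1
        exact_mod_cast fun h => this (by exact_mod_cast h)
      · exact pvInv_contains_false n hn htk hm

lemma pvALoop_run (n : Nat) (hn : 2 ≤ n) :
    ∃ m', pvALoop (n : Int) (n + 1) 1 (∅ : Std.HashMap Int Int) =
        (((pvR n (pvK n hn) : Nat) : Int), m') ∧ pvInv n (pvK n hn) m' := by
  have h0 : ((pvR n 0 : Nat) : Int) = 1 := by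
    unfold pvR; rw [pow_zero, Nat.mod_eq_of_lt (by omega)]; rfl
  have := pvALoop_steps n hn (pvK n hn) 0 (n + 1) ∅ (pvInv_empty n) (by omega)
    (by have := pvK_le n hn; omega)
  rwa [h0] at this

-- once a remainder is 0 it stays 0
lemma pvR_zero_after (n : Nat) (_hn : 2 ≤ n) {t : Nat} (h : pvR n t = 0) :
    ∀ i, t ≤ i → pvR n i = 0 := by
  intro i hi
  induction i with
  | zero =>
    have ht : t = 0 := by omega
    rw [ht] at h; exact h
  | succ i ih =>
    rcases Nat.lt_or_ge t (i + 1) with h' | h'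
    · rw [pvR_succ, ih (by omega)]; simp
    · have : t = i + 1 := by omega
      rw [← this]; exact h

-- forward periodicity with period p = k - j from index j on
lemma pvR_per (n : Nat) (hn : 2 ≤ n) {j : Nat} (hj : j < pvK n hn)
    (hjr : pvR n j = pvR n (pvK n hn)) :
    ∀ i, j ≤ i → pvR n (i + (pvK n hn - j)) = pvR n i := by
  intro i hi
  induction i, hi using Nat.le_induction with
  | base =>
    have : j + (pvK n hn - j) = pvK n hn := by omega
    rw [this, ← hjr]
  | succ i hi ih =>
    have : i + 1 + (pvK n hn - j) = (i + (pvK n hn - j)) + 1 := by omega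
    rw [this, pvR_succ, ih, ← pvR_succ]

lemma pvR_rep (n : Nat) (hn : 2 ≤ n) {j : Nat} (hj : j < pvK n hn)
    (hjr : pvR n j = pvR n (pvK n hn)) :
    ∀ m, pvR n (j + m) = pvR n (j + m % (pvK n hn - j)) := by
  intro m
  induction m using Nat.strong_induction_on with
  | _ m ih =>
    set p := pvK n hn - j with hp
    have hppos : 0 < p := by omega
    rcases Nat.lt_or_ge m p with h | h
    · rw [Nat.mod_eq_of_lt h]
    · have h1 : j + m = (j + (m - p)) + p := by omega
      rw [h1, pvR_per n hn hj hjr (j + (m - p)) (by omega), ih (m - p) (by omega)]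
      have hmp : m % p = (m - p) % p := by
        conv_lhs => rw [show m = (m - p) + p by omega]
        rw [Nat.add_mod_right]
      rw [hmp]

-- if two remainders at indices ≥ j agree, their distance is a multiple of the period
lemma pvR_dvd (n : Nat) (hn : 2 ≤ n) {j : Nat} (hj : j < pvK n hn)
    (hjr : pvR n j = pvR n (pvK n hn)) {m c : Nat}
    (h : pvR n (j + m + c) = pvR n (j + m)) : (pvK n hn - j) ∣ c := by
  set p := pvK n hn - j with hp
  have hppos : 0 < p := by omega
  have h1 : pvR n (j + (m + c) % p) = pvR n (j + m % p) := by
    rw [← pvR_rep n hn hj hjr, ← pvR_rep n hn hj hjr, ← Nat.add_assoc]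
    exact h
  have h2 : j + (m + c) % p = j + m % p :=
    pvR_inj n hn (by have := Nat.mod_lt (m + c) hppos; omega)
      (by have := Nat.mod_lt m hppos; omega) h1
  have h3 : (m + c) % p = m % p := by omega
  have : (m + c) ≡ m [MOD p] := by unfold Nat.ModEq; omega
  have := (Nat.modEq_iff_dvd' (Nat.le_add_right m c)).1 this.symm
  simpa using this

-- no remainder is ever 0 in the recurring case
lemma pvR_ne_zero (n : Nat) (hn : 2 ≤ n) {j : Nat} (hj : j < pvK n hn)
    (hjr : pvR n j = pvR n (pvK n hn)) : ∀ i, pvR n i ≠ 0 := by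
  intro i
  rcases Nat.lt_or_ge i (pvK n hn) with h | h
  · exact (pvK_min n hn h).1
  · have : i = j + (i - j) := by omega
    rw [this, pvR_rep n hn hj hjr]
    exact (pvK_min n hn
      (by have := Nat.mod_lt (i - j) (show 0 < pvK n hn - j by omega); omega)).1

-- B's while loop counts exactly the period
lemma pvBLoop_steps (n : Nat) (hn : 2 ≤ n) {j : Nat} (hj : j < pvK n hn)
    (hjr : pvR n j = pvR n (pvK n hn)) :
    ∀ (q i fuel : Nat) (c : Int), i + q = pvK n hn - j → 1 ≤ i → q < fuel →
      pvBLoop (n : Int) fuel ((pvR n (n + i) : Nat) : Int) ((pvR n n : Nat) : Int) c =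
        c + (q : Int) := by
  have hjn : j ≤ n := le_trans (Nat.le_of_lt hj) (pvK_le n hn)
  intro q
  induction q with
  | zero =>
    intro i fuel c hi hi1 hf
    obtain ⟨fuel, rfl⟩ : ∃ f, fuel = f + 1 := ⟨fuel - 1, by omega⟩
    rw [pvBLoop]
    have : pvR n (n + i) = pvR n n := by
      have : i = pvK n hn - j := by omega
      rw [this]
      exact pvR_per n hn hj hjr n hjn
    rw [this, if_neg (by simp)]
    simp
  | succ q ih =>
    intro i fuel c hi hi1 hf
    obtain ⟨fuel, rfl⟩ : ∃ f, fuel = f + 1 := ⟨fuel - 1, by omega⟩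
    rw [pvBLoop]
    rw [if_pos]
    · have hmod : PySem.Int.mod (((pvR n (n + i) : Nat) : Int) * 10) (n : Int) =
          ((pvR n (n + i + 1) : Nat) : Int) := by
        have : ((pvR n (n + i) : Nat) : Int) * 10 = ((pvR n (n + i) * 10 : Nat) : Int) := by
          push_cast; ring
        rw [this, PySem.Int.mod_natCast, pvR_succ]
      rw [hmod]
      have := ih (i + 1) fuel (c + 1) (by omega) (by omega) (by omega)
      rw [show n + (i + 1) = n + i + 1 by omega] at this
      rw [this]
      push_cast; ring
    · intro heq
      have heq' : pvR n (n + i) = pvR n n := by exact_mod_cast heq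
      have hdvd : (pvK n hn - j) ∣ i := by
        apply pvR_dvd n hn hj hjr (m := n - j)
        rw [show j + (n - j) + i = n + i by omega, show j + (n - j) = n by omega]
        exact heq'
      have := Nat.le_of_dvd (by omega) hdvd
      omega

-- powMod gives the remainder at index n
lemma pvPowMod (n : Nat) : PySem.Int.powMod 10 n (n : Int) = ((pvR n n : Nat) : Int) := by
  unfold PySem.Int.powMod pvR
  have : (10 : Int) ^ n = ((10 ^ n : Nat) : Int) := by push_cast; ring
  rw [this, PySem.Int.mod_natCast]

-- the two loop bodies agree for every d ≥ 2
lemma step_eq (st : Int × Int) (d : Int) (hd : 2 ≤ d) : pvAStep st d = pvBStep st d := by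
  set n := d.toNat with hn'
  have hdn : d = (n : Int) := by omega
  have hn : 2 ≤ n := by omega
  rw [hdn]
  unfold pvAStep pvBStep
  simp only [Int.toNat_natCast]
  obtain ⟨m', hrun, hminv⟩ := pvALoop_run n hn
  rw [hrun, pvPowMod n]
  rcases pvK_spec n hn with h0 | ⟨j, hj, hjr⟩
  · -- terminating decimal: both skip d
    have hRn : pvR n n = 0 :=
      pvR_zero_after n hn h0 n (pvK_le n hn)
    rw [h0, hRn]
    simp
  · -- recurring: A computes k - j, B counts the same period
    have hRk : pvR n (pvK n hn) ≠ 0 := pvR_ne_zero n hn hj hjr _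
    have hRn : pvR n n ≠ 0 := pvR_ne_zero n hn hj hjr _
    have hmod : PySem.Int.mod (((pvR n n : Nat) : Int) * 10) (n : Int) =
        ((pvR n (n + 1) : Nat) : Int) := by
      have : ((pvR n n : Nat) : Int) * 10 = ((pvR n n * 10 : Nat) : Int) := by push_cast; ring
      rw [this, PySem.Int.mod_natCast, ← pvR_succ]
    have hb := pvBLoop_steps n hn hj hjr (pvK n hn - j - 1) 1 (n + 1) 1
      (by omega) (le_refl 1)
      (by have := pvK_le n hn; omega)
    rw [hmod]
    simp only [ne_eq, Nat.cast_eq_zero, hRk, not_false_eq_true, if_pos, hRn]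
    have hget : m'.getD ((pvR n (pvK n hn) : Nat) : Int) 0 = (j : Int) := by
      rw [← hjr]
      exact hminv.2.2 j hj
    rw [hget, hminv.1, hb]
    have hlen : (1 : Int) + ((pvK n hn - j - 1 : Nat) : Int) = (pvK n hn : Int) - (j : Int) := by
      omega
    rw [hlen]

-- ===== VERDICT (by name: the statement is the Claim_ definition above) =====
theorem find_longest_recurring_cycle_spec : Claim_equal_find_longest_recurring_cycle := by
  intro limit _
  unfold Spec_find_longest_recurring_cycle find_longest_recurring_cycle
    find_longest_recurring_cycle_alt
  congr 1
  apply PySem.List.foldl_congr_mem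
  intro acc x hx
  exact step_eq acc x (PySem.List.mem_pyRange_one.1 hx).1
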